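-- pv_equiv track=rewrite | github.com/Awnder/playfair_andrew-timmy | playfair_project.py | encode_playfair_digrams
-- ===== SOURCE A (Python) =====
-- def encode_playfair_digrams(plaintext):
--     '''Breaks plaintext into a string of digrams, adding q's when letter repeats or at end if odd number of characters'''
--     digrams = list(plaintext.lower().replace(' ', ''))
--
--     for i, digram in enumerate(digrams):
--         if i % 2 == 1:
--             if digram == digrams[i-1]:
--                 digrams.insert(i,'q')
--
--     if len(digrams) % 2 == 1: # if last digram does not have pair
--         digrams.append('q')
--
--     return ''.join(digrams)
-- ===== SOURCE B (Python) =====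
-- def encode_playfair_digrams(plaintext):
--     '''Breaks plaintext into a string of digrams, adding q's when letter repeats or at end if odd number of characters'''
--     chars = plaintext.lower().replace(' ', '')
--     out = []
--     i = 0
--     n = len(chars)
--     while i < n:
--         out.append(chars[i])
--         if i + 1 < n:
--             if chars[i + 1] == chars[i]:
--                 out.append('q')
--                 i += 1
--             else:
--                 out.append(chars[i + 1])
--                 i += 2
--         else:
--             i += 1
--     if len(out) % 2 == 1:
--         out.append('q')
--     return ''.join(out)
-- ===== Notes on version B (the rewrite author's own statement) =====
-- stated objective: faster
-- what changed: Replaces A's enumerate-and-splice loop (inserting 'q' into the list mid-iteration, each insert shifting the tail) by a single forward pass with a variable-step index that builds a fresh output list pair by pair.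
import Mathlib
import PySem

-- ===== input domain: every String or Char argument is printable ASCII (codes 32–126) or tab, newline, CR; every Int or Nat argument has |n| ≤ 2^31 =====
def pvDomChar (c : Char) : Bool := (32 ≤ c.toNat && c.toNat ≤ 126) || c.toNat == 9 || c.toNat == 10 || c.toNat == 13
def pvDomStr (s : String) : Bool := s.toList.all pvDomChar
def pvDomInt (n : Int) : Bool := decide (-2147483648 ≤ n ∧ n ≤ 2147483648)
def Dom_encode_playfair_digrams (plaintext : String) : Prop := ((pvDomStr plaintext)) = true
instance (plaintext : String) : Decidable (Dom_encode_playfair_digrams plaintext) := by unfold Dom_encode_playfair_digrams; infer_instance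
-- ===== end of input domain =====

-- B replaces A's splice-'q'-into-the-list-mid-iteration loop by a single forward pass with a
-- variable-step index that builds the output afresh (avoiding A's mid-list inserts).

-- ===== PORT A =====
-- Python's `for i, digram in enumerate(digrams)` over a list that is mutated by `insert`
-- re-reads the live list at each step; ported as an index-stepping recursion over the list state.
-- The fuel argument is only a totality guard (the loop genuinely terminates: the list grows at
-- most once per two index steps); fuel 2*len is proved sufficient in pvA_loop_eq below.
def pvA_loop : Nat → List Char → Nat → List Char
  | 0, l, _ => l
  | fuel + 1, l, k =>
    if h : k < l.length then
      let d := l[k]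
      if k % 2 = 1 then
        if d = l[k-1]'(by omega) then
          pvA_loop fuel (PySem.List.insert l (k : Int) 'q') (k + 1)
        else
          pvA_loop fuel l (k + 1)
      else
        pvA_loop fuel l (k + 1)
    else l

-- digrams is a Python list of single-character strings, represented as List Char;
-- ''.join(digrams) is exactly String.ofList of that list.
def encode_playfair_digrams (plaintext : String) : String :=
  let digrams := (PySem.Str.replace (PySem.Str.lower plaintext) " " "").toList
  let digrams := pvA_loop (2 * digrams.length) digrams 0
  let digrams := if digrams.length % 2 = 1 then digrams ++ ['q'] else digrams
  String.ofList digrams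

-- ===== PORT B =====
-- the `while i < n` loop of Source B, accumulating `out`; fuel (one unit per iteration,
-- the index advances by at least 1) is only a totality guard, len is proved sufficient below.
def pvB_loop : Nat → List Char → Nat → List Char → List Char
  | 0, _, _, out => out
  | fuel + 1, chars, i, out =>
    if h : i < chars.length then
      let out := out ++ [chars[i]]
      if h2 : i + 1 < chars.length then
        if chars[i+1] = chars[i] then
          pvB_loop fuel chars (i + 1) (out ++ ['q'])
        else
          pvB_loop fuel chars (i + 2) (out ++ [chars[i+1]])
      else
        pvB_loop fuel chars (i + 1) out
    else out

def encode_playfair_digrams_alt (plaintext : String) : String :=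
  let chars := (PySem.Str.replace (PySem.Str.lower plaintext) " " "").toList
  let out := pvB_loop chars.length chars 0 []
  let out := if out.length % 2 = 1 then out ++ ['q'] else out
  String.ofList out

-- ===== PRECONDITION & SPEC =====
def Spec_encode_playfair_digrams (plaintext : String) (out : String) : Prop := out = encode_playfair_digrams_alt plaintext
instance (plaintext : String) (out : String) : Decidable (Spec_encode_playfair_digrams plaintext out) := by unfold Spec_encode_playfair_digrams; infer_instance

-- ===== CLAIM (what is proved, stated in full; the proofs are below) =====
def Claim_equal_encode_playfair_digrams : Prop := ∀ (plaintext : String), Dom_encode_playfair_digrams plaintext → Spec_encode_playfair_digrams plaintext (encode_playfair_digrams plaintext)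

-- ===== LEMMAS AND PROOFS =====

-- common characterisation: the digram stream both loops compute
def pvG : List Char → List Char
  | [] => []
  | [a] => [a]
  | a :: b :: r => if b = a then a :: 'q' :: pvG (b :: r) else a :: b :: pvG r
termination_by l => l.length

lemma pvB_loop_eq (fuel : Nat) (chars : List Char) (i : Nat) (out : List Char)
    (hf : chars.length - i ≤ fuel) :
    pvB_loop fuel chars i out = out ++ pvG (chars.drop i) := by
  induction fuel generalizing i out with
  | zero =>
    have h3 : chars.drop i = [] := List.drop_eq_nil_of_le (by omega)
    rw [pvB_loop, h3, pvG, List.append_nil]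
  | succ fuel ih =>
    rw [pvB_loop]
    by_cases h : i < chars.length
    · simp only [h, dif_pos]
      have hdrop : chars.drop i = chars[i] :: chars.drop (i + 1) := List.drop_eq_getElem_cons h
      by_cases h2 : i + 1 < chars.length
      · have hdrop2 : chars.drop (i + 1) = chars[i+1] :: chars.drop (i + 2) :=
          List.drop_eq_getElem_cons h2
        simp only [h2, dif_pos]
        by_cases he : chars[i+1] = chars[i]
        · rw [if_pos he, ih (i+1) _ (by omega), hdrop, hdrop2, pvG, if_pos he]
          simp
        · rw [if_neg he, ih (i+2) _ (by omega), hdrop, hdrop2, pvG, if_neg he]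
          simp
      · simp only [h2, dif_neg, not_false_iff]
        rw [ih (i+1) _ (by omega)]
        have h3 : chars.drop (i + 1) = [] := List.drop_eq_nil_of_le (by omega)
        rw [hdrop, h3]
        simp [pvG]
    · simp only [h, dif_neg, not_false_iff]
      have h3 : chars.drop i = [] := List.drop_eq_nil_of_le (by omega)
      rw [h3, pvG, List.append_nil]

lemma pvA_loop_eq (rest done : List Char) (fuel : Nat) (hk : done.length % 2 = 0)
    (hf : 2 * rest.length ≤ fuel) :
    pvA_loop fuel (done ++ rest) done.length = done ++ pvG rest := by
  induction hn : rest.length using Nat.strong_induction_on generalizing rest done fuel with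
  | _ n ih =>
  match rest with
  | [] =>
    match fuel with
    | 0 => rw [pvA_loop]; simp [pvG]
    | fuel + 1 =>
      rw [pvA_loop, dif_neg (by simp)]
      simp [pvG]
  | [a] =>
    match fuel, hf with
    | fuel + 2, _ =>
      rw [pvA_loop, dif_pos (by simp)]
      simp only [hk]
      rw [if_neg (by omega)]
      rw [pvA_loop, dif_neg (by simp)]
      simp [pvG]
  | a :: b :: r =>
    match fuel, hf with
    | fuel + 2, hf =>
    have hga : (done ++ a :: b :: r)[done.length]'(by simp) = a := by
      rw [List.getElem_append_right (le_refl _)]; simp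
    have hgb : (done ++ a :: b :: r)[done.length + 1]'(by simp) = b := by
      rw [List.getElem_append_right (by omega)]; simp
    -- first step: even index, no action
    rw [pvA_loop, dif_pos (by simp)]
    simp only [hk]
    rw [if_neg (by omega)]
    -- second step: odd index
    rw [pvA_loop, dif_pos (by simp)]
    rw [if_pos (by omega)]
    simp only [Nat.add_sub_cancel, hga, hgb]
    by_cases he : b = a
    · rw [if_pos he]
      have hins : PySem.List.insert (done ++ a :: b :: r) ((done.length + 1 : Nat) : Int) 'q'
          = (done ++ [a, 'q']) ++ b :: r := by
        rw [PySem.List.insert_natCast _ _ _ (by simp only [List.length_append, List.length_cons]; omega)]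
        have ht : (done ++ a :: b :: r).take (done.length + 1) = done ++ [a] := by
          rw [show done ++ a :: b :: r = (done ++ [a]) ++ b :: r by simp,
            show done.length + 1 = (done ++ [a]).length by simp, List.take_left]
        have hd : (done ++ a :: b :: r).drop (done.length + 1) = b :: r := by
          rw [show done ++ a :: b :: r = (done ++ [a]) ++ b :: r by simp,
            show done.length + 1 = (done ++ [a]).length by simp, List.drop_left]
        rw [ht, hd]; simp
      rw [hins]
      have h2 : done.length + 1 + 1 = (done ++ [a, 'q']).length := by simp
      rw [h2, ih (b :: r).length (by have h := hn; simp only [List.length_cons] at h ⊢; omega)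
        (b :: r) (done ++ [a, 'q']) fuel
        (by simp only [List.length_append, List.length_cons, List.length_nil]; omega)
        (by have h := hn; simp only [List.length_cons] at hf ⊢; omega) rfl]
      rw [pvG, if_pos he]
      simp
    · rw [if_neg he]
      have h2 : done.length + 1 + 1 = (done ++ [a, b]).length := by simp
      rw [show done ++ a :: b :: r = (done ++ [a, b]) ++ r by simp, h2,
        ih r.length (by have h := hn; simp only [List.length_cons] at h ⊢; omega)
        r (done ++ [a, b]) fuel
        (by simp only [List.length_append, List.length_cons, List.length_nil]; omega)
        (by simp only [List.length_cons] at hf ⊢; omega) rfl]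
      rw [pvG, if_neg he]
      simp

-- ===== VERDICT (by name: the statement is the Claim_ definition above) =====
theorem encode_playfair_digrams_spec : Claim_equal_encode_playfair_digrams := by
  intro plaintext _
  unfold Spec_encode_playfair_digrams encode_playfair_digrams encode_playfair_digrams_alt
  have hA := pvA_loop_eq ((PySem.Str.replace (PySem.Str.lower plaintext) " " "").toList) []
    (2 * ((PySem.Str.replace (PySem.Str.lower plaintext) " " "").toList).length) rfl (le_refl _)
  have hB := pvB_loop_eq ((PySem.Str.replace (PySem.Str.lower plaintext) " " "").toList).length
    ((PySem.Str.replace (PySem.Str.lower plaintext) " " "").toList) 0 [] (by omega)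
  simp only [List.nil_append, List.length_nil, List.drop_zero] at hA hB
  simp only [hA, hB]
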